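-- pv_equiv track=rewrite | github.com/pypi-data/pypi-mirror-395 | packages/rdetoolkit/rdetoolkit-1.4.3.tar.gz/rdetoolkit-1.4.3/tools/snipet.py | _format_snippet
-- ===== SOURCE A (Python) =====
-- def _format_snippet(lines: list[str], start: int, end: int, max_chars: int = 8000) -> tuple[str, int, int]:
--     """Format code snippet with line numbers, truncating if too long."""
--     def render(start_idx: int, end_idx: int) -> str:
--         return "\n".join(f"{i+1:>5}: {lines[i]}" for i in range(start_idx, end_idx))
--
--     current_start, current_end = start, end
--     snippet = render(current_start, current_end)
--
--     while len(snippet) > max_chars and current_end - current_start > 20: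
--         current_start += 5
--         current_end -= 5
--         snippet = render(current_start, current_end)
--
--     return snippet, current_start, current_end
-- ===== SOURCE B (Python) =====
-- def _format_snippet(lines: list[str], start: int, end: int, max_chars: int = 8000) -> tuple[str, int, int]:
--     """Format code snippet with line numbers, truncating if too long.
--
--     Render each line once, keep prefix sums of rendered lengths so each
--     truncation step checks the snippet length in O(1), and join the final
--     window once at the end.
--     """
--     rendered = [f"{i+1:>5}: {lines[i]}" for i in range(start, end)]
--     pref = [0]
--     t = 0
--     for r in rendered:
--         t += len(r) + 1  # +1 for the joining newline
--         pref.append(t)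
--
--     def window_len(s: int, e: int) -> int:
--         if e <= s:
--             return 0
--         return pref[e - start] - pref[s - start] - 1
--
--     s, e = start, end
--     while window_len(s, e) > max_chars and e - s > 20:
--         s += 5
--         e -= 5
--     return "\n".join(rendered[s - start:e - start]), s, e
-- ===== Notes on version B (the rewrite author's own statement) =====
-- stated objective: alternative
-- what changed: A re-renders and re-joins the whole window on every truncation step; B renders each numbered line once, keeps prefix sums of the rendered lengths so each truncation step checks the snippet length in O(1), and joins the final window once.
import Mathlib
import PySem

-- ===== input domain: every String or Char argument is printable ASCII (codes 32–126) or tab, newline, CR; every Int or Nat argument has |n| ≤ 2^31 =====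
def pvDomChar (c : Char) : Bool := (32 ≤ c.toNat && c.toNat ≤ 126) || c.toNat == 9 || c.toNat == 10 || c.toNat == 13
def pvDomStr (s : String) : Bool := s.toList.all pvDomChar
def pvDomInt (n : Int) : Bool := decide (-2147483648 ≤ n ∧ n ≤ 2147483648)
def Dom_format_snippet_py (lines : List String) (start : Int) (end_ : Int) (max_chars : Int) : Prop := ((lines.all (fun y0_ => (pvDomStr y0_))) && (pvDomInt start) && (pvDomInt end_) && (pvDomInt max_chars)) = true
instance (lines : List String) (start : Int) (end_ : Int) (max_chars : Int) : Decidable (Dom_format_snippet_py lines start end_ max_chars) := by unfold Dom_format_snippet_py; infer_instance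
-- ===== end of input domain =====

-- B renders each numbered line once and keeps prefix sums of rendered lengths, so each
-- truncation step checks the snippet length in O(1) and the final window is joined once.

-- shared helper: the rendered line f"{i+1:>5}: {lines[i]}" as a list of chars
-- (lines[i] via pyGetD; the default "" is unreachable under Pre_)
def pvRenderLine (lines : List String) (i : Int) : List Char :=
  let t := PySem.Int.toChars (i + 1)
  List.replicate (5 - t.length) ' ' ++ t ++ [':', ' '] ++ (PySem.List.pyGetD lines i "").toList

-- ===== PORT A =====
-- render(start_idx, end_idx)
def pvRenderA (lines : List String) (s e : Int) : List Char :=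
  PySem.Chars.join ['\n'] ((PySem.List.pyRange s e 1).map (pvRenderLine lines))

-- the while loop: render, test, shrink
def pvLoopA (lines : List String) (max_chars : Int) (s e : Int) : String × Int × Int :=
  let snippet := pvRenderA lines s e
  if ((snippet.length : Int) > max_chars ∧ e - s > 20) then
    pvLoopA lines max_chars (s + 5) (e - 5)
  else
    (String.ofList snippet, s, e)
termination_by (e - s).toNat
decreasing_by omega

def format_snippet_py (lines : List String) (start : Int) (end_ : Int) (max_chars : Int) : String × Int × Int :=
  pvLoopA lines max_chars start end_

-- ===== PORT B =====
-- pref = [0]; t = 0; for r in rendered: t += len(r)+1; pref.append(t)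
def pvPref (rendered : List (List Char)) : List Int :=
  (rendered.foldl
    (fun (p : List Int × Int) r =>
      (p.1 ++ [p.2 + (r.length : Int) + 1], p.2 + (r.length : Int) + 1))
    (([0] : List Int), (0 : Int))).1

-- window_len(s, e)
def pvWindowLen (pref : List Int) (start : Int) (s e : Int) : Int :=
  if e ≤ s then 0
  else PySem.List.pyGetD pref (e - start) 0 - PySem.List.pyGetD pref (s - start) 0 - 1

-- the while loop of B: only the indices move; length checks via pref
def pvLoopB (pref : List Int) (start max_chars : Int) (s e : Int) : Int × Int :=
  if (pvWindowLen pref start s e > max_chars ∧ e - s > 20) then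
    pvLoopB pref start max_chars (s + 5) (e - 5)
  else
    (s, e)
termination_by (e - s).toNat
decreasing_by omega

def format_snippet_py_alt (lines : List String) (start : Int) (end_ : Int) (max_chars : Int) : String × Int × Int :=
  let rendered := (PySem.List.pyRange start end_ 1).map (pvRenderLine lines)
  let pref := pvPref rendered
  let se := pvLoopB pref start max_chars start end_
  (String.ofList (PySem.Chars.join ['\n']
      (PySem.List.slice rendered (some (se.1 - start)) (some (se.2 - start)))),
   se.1, se.2)

-- ===== PRECONDITION & SPEC =====
-- Pre_ excludes exactly the inputs on which Python A raises IndexError: some line index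
-- in range(start, end) out of range for `lines` (the very first render touches them all).
def Pre_format_snippet_py (lines : List String) (start : Int) (end_ : Int) (max_chars : Int) : Prop :=
  start < end_ → (-(lines.length : Int) ≤ start ∧ end_ ≤ (lines.length : Int))
instance (lines : List String) (start : Int) (end_ : Int) (max_chars : Int) : Decidable (Pre_format_snippet_py lines start end_ max_chars) := by unfold Pre_format_snippet_py; infer_instance

def pvWitness_format_snippet_py : List String × Int × Int × Int := (["x = 1", "y = 2"], 0, 2, 100)

def Spec_format_snippet_py (lines : List String) (start : Int) (end_ : Int) (max_chars : Int) (out : String × Int × Int) : Prop := out = format_snippet_py_alt lines start end_ max_chars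
instance (lines : List String) (start : Int) (end_ : Int) (max_chars : Int) (out : String × Int × Int) : Decidable (Spec_format_snippet_py lines start end_ max_chars out) := by unfold Spec_format_snippet_py; infer_instance

-- ===== CLAIM (what is proved, stated in full; the proofs are below) =====
def Claim_equal_format_snippet_py : Prop := ∀ (lines : List String) (start : Int) (end_ : Int) (max_chars : Int), Dom_format_snippet_py lines start end_ max_chars → Pre_format_snippet_py lines start end_ max_chars → Spec_format_snippet_py lines start end_ max_chars (format_snippet_py lines start end_ max_chars)

-- ===== LEMMAS AND PROOFS =====

-- the partial sums pvPref appends after the initial 0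
def pvPartial (t : Int) : List (List Char) → List Int
  | [] => []
  | r :: rs => (t + (r.length : Int) + 1) :: pvPartial (t + (r.length : Int) + 1) rs

lemma pvPref_foldl (l : List (List Char)) : ∀ (acc : List Int) (t : Int),
    (l.foldl
      (fun (p : List Int × Int) r =>
        (p.1 ++ [p.2 + (r.length : Int) + 1], p.2 + (r.length : Int) + 1))
      (acc, t)) = (acc ++ pvPartial t l, t + ((l.map (fun r => (r.length : Int) + 1)).sum)) := by
  induction l with
  | nil => intro acc t; simp [pvPartial]
  | cons r rs ih =>
    intro acc t
    simp only [List.foldl_cons, ih, pvPartial, List.map_cons, List.sum_cons, Prod.mk.injEq]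
    exact ⟨by simp, by ring⟩

-- S l j = sum of (len r + 1) over the first j rendered lines
def pvS (l : List (List Char)) (j : Nat) : Int :=
  ((l.take j).map (fun r => (r.length : Int) + 1)).sum

lemma pvPartial_get (l : List (List Char)) : ∀ (t : Int) (j : Nat), j < l.length →
    (pvPartial t l)[j]? = some (t + pvS l (j + 1)) := by
  induction l with
  | nil => intro t j h; simp at h
  | cons r rs ih =>
    intro t j h
    cases j with
    | zero => simp [pvPartial, pvS]; ring
    | succ k =>
      have hk : k < rs.length := by simpa using h
      simp only [pvPartial, List.getElem?_cons_succ, ih _ k hk, pvS, List.take_succ_cons,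
        List.map_cons, List.sum_cons]
      congr 1
      ring

lemma pvPref_get (l : List (List Char)) (j : Nat) (hj : j ≤ l.length) :
    (pvPref l)[j]? = some (pvS l j) := by
  unfold pvPref
  rw [pvPref_foldl]
  cases j with
  | zero => simp [pvS]
  | succ k =>
    have hk : k < l.length := by omega
    have := pvPartial_get l 0 k hk
    simp only [List.cons_append, List.nil_append, List.getElem?_cons_succ, this, pvS]
    simp [pvS] at this ⊢

lemma pvPref_getD (l : List (List Char)) (j : Int) (h0 : 0 ≤ j) (hj : j ≤ l.length) :
    PySem.List.pyGetD (pvPref l) j 0 = pvS l j.toNat := by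
  have : j = (j.toNat : Int) := by omega
  rw [this, PySem.List.pyGetD_natCast]
  have := pvPref_get l j.toNat (by omega)
  simp [this]
  congr 1
  omega

-- length of "\n".join on a nonempty list of pieces
lemma pvJoin_len (l : List (List Char)) (h : l ≠ []) :
    ((PySem.Chars.join ['\n'] l).length : Int) = (l.map (fun r => (r.length : Int) + 1)).sum - 1 := by
  induction l with
  | nil => simp at h
  | cons r rs ih =>
    cases rs with
    | nil => simp [PySem.Chars.join_singleton]
    | cons r2 rs2 =>
      rw [PySem.Chars.join_cons_cons]
      have := ih (by simp)
      simp only [List.map_cons, List.sum_cons, List.length_append, List.length_singleton] at this ⊢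
      push_cast
      omega

-- a subrange of the rendered table is a drop/take of the full one
lemma pvRange_drop_take (f : Int → List Char) (start end_ s e : Int)
    (h1 : start ≤ s) (h2 : s ≤ e) (h3 : e ≤ end_) :
    (PySem.List.pyRange s e 1).map f =
      (((PySem.List.pyRange start end_ 1).map f).drop (s - start).toNat).take
        ((e - start).toNat - (s - start).toNat) := by
  have hs : s ≤ end_ := le_trans h2 h3
  rw [PySem.List.pyRange_one_append start s end_ h1 hs]
  rw [PySem.List.pyRange_one_append s e end_ h2 h3]
  simp only [List.map_append]
  rw [List.drop_append_of_le_length (by simp [PySem.List.length_pyRange_one])]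
  rw [List.drop_of_length_le (by simp [PySem.List.length_pyRange_one])]
  simp only [List.nil_append]
  rw [List.take_append_of_le_length (by simp [PySem.List.length_pyRange_one]; omega)]
  rw [List.take_of_length_le (by simp [PySem.List.length_pyRange_one]; omega)]

-- inside the loop window the O(1) length equals the rendered snippet length
lemma pvWindowLen_eq (lines : List String) (start end_ s e : Int)
    (h1 : start ≤ s) (h2 : s < e) (h3 : e ≤ end_) :
    pvWindowLen (pvPref ((PySem.List.pyRange start end_ 1).map (pvRenderLine lines))) start s e =
      ((pvRenderA lines s e).length : Int) := by
  set rendered := (PySem.List.pyRange start end_ 1).map (pvRenderLine lines) with hrend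
  have hlen : (rendered.length : Int) = (end_ - start).toNat := by
    simp [hrend, PySem.List.length_pyRange_one]
  have hse : start < end_ := by omega
  unfold pvWindowLen
  rw [if_neg (by omega)]
  rw [pvPref_getD rendered (e - start) (by omega) (by omega)]
  rw [pvPref_getD rendered (s - start) (by omega) (by omega)]
  have hdt := pvRange_drop_take (pvRenderLine lines) start end_ s e h1 (le_of_lt h2) h3
  have hsub : rendered.take (e - start).toNat =
      rendered.take (s - start).toNat ++
        ((rendered.drop (s - start).toNat).take ((e - start).toNat - (s - start).toNat)) := by
    rw [← List.take_add]
    congr 1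
    omega
  have hne : (PySem.List.pyRange s e 1).map (pvRenderLine lines) ≠ [] := by
    have : (PySem.List.pyRange s e 1).length = (e - s).toNat := PySem.List.length_pyRange_one s e
    intro hc
    rw [hc] at hdt
    have := congrArg List.length hdt
    simp [PySem.List.length_pyRange_one] at this
    omega
  unfold pvRenderA
  rw [pvJoin_len _ hne, hdt, ← hrend]
  unfold pvS
  rw [hsub]
  simp [List.sum_append]

-- the two loops agree and B's final window joins to A's final render
lemma pvLoop_agree (lines : List String) (start end_ max_chars : Int) :
    ∀ (n : Nat) (s e : Int), (e - s).toNat ≤ n → start ≤ s → s < e → e ≤ end_ →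
    pvLoopA lines max_chars s e =
      (String.ofList (PySem.Chars.join ['\n']
        (PySem.List.slice ((PySem.List.pyRange start end_ 1).map (pvRenderLine lines))
          (some ((pvLoopB (pvPref ((PySem.List.pyRange start end_ 1).map (pvRenderLine lines))) start max_chars s e).1 - start))
          (some ((pvLoopB (pvPref ((PySem.List.pyRange start end_ 1).map (pvRenderLine lines))) start max_chars s e).2 - start)))),
       (pvLoopB (pvPref ((PySem.List.pyRange start end_ 1).map (pvRenderLine lines))) start max_chars s e).1,
       (pvLoopB (pvPref ((PySem.List.pyRange start end_ 1).map (pvRenderLine lines))) start max_chars s e).2) := by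
  intro n
  induction n with
  | zero => intro s e hn h1 h2 h3; omega
  | succ m ih =>
    intro s e hn h1 h2 h3
    have hw := pvWindowLen_eq lines start end_ s e h1 h2 h3
    rw [pvLoopA.eq_def, pvLoopB.eq_def]
    by_cases hc : ((pvRenderA lines s e).length : Int) > max_chars ∧ e - s > 20
    · rw [if_pos hc, if_pos (by rw [hw]; exact hc)]
      exact ih (s + 5) (e - 5) (by omega) (by omega) (by omega) (by omega)
    · rw [if_neg hc, if_neg (by rw [hw]; exact hc)]
      have hdt := pvRange_drop_take (pvRenderLine lines) start end_ s e h1 (le_of_lt h2) h3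
      have hslice : PySem.List.slice ((PySem.List.pyRange start end_ 1).map (pvRenderLine lines))
          (some (s - start)) (some (e - start)) = (PySem.List.pyRange s e 1).map (pvRenderLine lines) := by
        rw [PySem.List.slice_toNat _ (by omega) (by omega), hdt]
      simp only [hslice]
      rfl

-- ===== VERDICT (by name: the statement is the Claim_ definition above) =====
theorem format_snippet_py_spec : Claim_equal_format_snippet_py := by
  intro lines start end_ max_chars _hdom _hpre
  unfold Spec_format_snippet_py format_snippet_py format_snippet_py_alt
  by_cases h : start < end_
  · exact pvLoop_agree lines start end_ max_chars (end_ - start).toNat start end_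
      (le_refl _) (le_refl _) h (le_refl _)
  · -- empty window: both loops return immediately with the empty snippet
    dsimp only
    rw [pvLoopA.eq_def, pvLoopB.eq_def]
    have hr : PySem.List.pyRange start end_ 1 = [] := PySem.List.pyRange_one_eq_nil (by omega)
    rw [if_neg (by omega), if_neg (by omega)]
    simp [pvRenderA, hr, PySem.Chars.join_nil, PySem.List.slice]
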